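-- pv_equiv track=rewrite | github.com/k-mcmonagle/subsea-cable-tools | rpl_manager/dockwidget.py | _detect_managed_prefixes
-- ===== SOURCE A (Python) =====
-- from typing import Dict, List, Optional, Tuple
--
-- def _detect_managed_prefixes(layer_names: List[str]) -> Dict[str, Dict[str, bool]]:
--     prefixes: Dict[str, Dict[str, bool]] = {}
--     for nm in layer_names:
--         if nm.endswith("_nodes"):
--             p = nm[: -len("_nodes")]
--             prefixes.setdefault(p, {"nodes": False, "segments": False, "assembly": False})
--             prefixes[p]["nodes"] = True
--         elif nm.endswith("_segments"):
--             p = nm[: -len("_segments")]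
--             prefixes.setdefault(p, {"nodes": False, "segments": False, "assembly": False})
--             prefixes[p]["segments"] = True
--         elif nm.endswith("_assembly"):
--             p = nm[: -len("_assembly")]
--             prefixes.setdefault(p, {"nodes": False, "segments": False, "assembly": False})
--             prefixes[p]["assembly"] = True
--     return {p: meta for p, meta in prefixes.items() if any(meta.values())}
-- ===== SOURCE B (Python) =====
-- from typing import Dict, List
--
--
-- def _detect_managed_prefixes(layer_names: List[str]) -> Dict[str, Dict[str, bool]]:
--     # Build the three suffix-prefix sets up front, then assemble each row by membership.
--     nodes = {nm[:-6] for nm in layer_names if nm.endswith("_nodes")}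
--     segments = {nm[:-9] for nm in layer_names if nm.endswith("_segments")}
--     assembly = {nm[:-9] for nm in layer_names if nm.endswith("_assembly")}
--     seen = set()
--     order = []
--     for nm in layer_names:
--         if nm.endswith("_nodes"):
--             p = nm[:-6]
--         elif nm.endswith("_segments") or nm.endswith("_assembly"):
--             p = nm[:-9]
--         else:
--             continue
--         if p not in seen:
--             seen.add(p)
--             order.append(p)
--     return {p: {"nodes": p in nodes, "segments": p in segments, "assembly": p in assembly}
--             for p in order}
-- ===== Notes on version B (the rewrite author's own statement) =====
-- stated objective: alternative
-- what changed: Replaces A's single branch-and-mutate dict pass (setdefault plus in-place flag updates) by three suffix-driven set comprehensions built up front plus a first-occurrence order list, assembling each row by set membership.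
import Mathlib
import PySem

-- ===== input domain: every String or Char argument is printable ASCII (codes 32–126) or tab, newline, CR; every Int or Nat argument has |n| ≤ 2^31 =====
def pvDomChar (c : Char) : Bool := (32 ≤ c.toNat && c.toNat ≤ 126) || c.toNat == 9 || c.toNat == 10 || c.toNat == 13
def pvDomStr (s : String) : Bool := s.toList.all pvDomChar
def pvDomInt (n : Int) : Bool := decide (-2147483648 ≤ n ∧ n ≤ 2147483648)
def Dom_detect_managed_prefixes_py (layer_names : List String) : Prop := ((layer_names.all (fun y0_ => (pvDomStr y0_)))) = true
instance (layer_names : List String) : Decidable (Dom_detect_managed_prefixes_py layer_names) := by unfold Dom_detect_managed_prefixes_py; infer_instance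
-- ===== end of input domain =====

-- B replaces A's single branch-and-mutate dict pass by three suffix-prefix sets built up front
-- plus a first-occurrence order list, assembling each row by set membership (alternative decomposition, same cost).

-- ===== PORT A =====
def mkMeta : PySem.Dict String Bool :=
  PySem.Dict.ofList [("nodes", false), ("segments", false), ("assembly", false)]

def aStep (d : PySem.Dict String (PySem.Dict String Bool)) (nm : String) :
    PySem.Dict String (PySem.Dict String Bool) :=
  if PySem.Str.endswith nm "_nodes" then
    let p := PySem.Str.slice nm none (some (-6))
    let d := d.setdefault p mkMeta
    d.modify p mkMeta (fun m => m.insert "nodes" true)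
  else if PySem.Str.endswith nm "_segments" then
    let p := PySem.Str.slice nm none (some (-9))
    let d := d.setdefault p mkMeta
    d.modify p mkMeta (fun m => m.insert "segments" true)
  else if PySem.Str.endswith nm "_assembly" then
    let p := PySem.Str.slice nm none (some (-9))
    let d := d.setdefault p mkMeta
    d.modify p mkMeta (fun m => m.insert "assembly" true)
  else d

def detect_managed_prefixes_py (layer_names : List String) : List (String × List (String × Bool)) :=
  let prefixes := layer_names.foldl aStep PySem.Dict.empty
  (prefixes.items.filter (fun pm => pm.2.values.any (fun b => b))).map (fun pm => (pm.1, pm.2.items))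

-- ===== PORT B =====
def bStep (st : PySem.Set String × List String) (nm : String) : PySem.Set String × List String :=
  if PySem.Str.endswith nm "_nodes" then
    let p := PySem.Str.slice nm none (some (-6))
    if PySem.Set.contains st.1 p then st else (PySem.Set.add st.1 p, st.2 ++ [p])
  else if PySem.Str.endswith nm "_segments" || PySem.Str.endswith nm "_assembly" then
    let p := PySem.Str.slice nm none (some (-9))
    if PySem.Set.contains st.1 p then st else (PySem.Set.add st.1 p, st.2 ++ [p])
  else st

def detect_managed_prefixes_py_alt (layer_names : List String) : List (String × List (String × Bool)) :=
  let nodes : PySem.Set String := PySem.Set.ofList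
    ((layer_names.filter (fun nm => PySem.Str.endswith nm "_nodes")).map
      (fun nm => PySem.Str.slice nm none (some (-6))))
  let segments : PySem.Set String := PySem.Set.ofList
    ((layer_names.filter (fun nm => PySem.Str.endswith nm "_segments")).map
      (fun nm => PySem.Str.slice nm none (some (-9))))
  let assembly : PySem.Set String := PySem.Set.ofList
    ((layer_names.filter (fun nm => PySem.Str.endswith nm "_assembly")).map
      (fun nm => PySem.Str.slice nm none (some (-9))))
  let st := layer_names.foldl bStep (PySem.Set.empty, [])
  st.2.map (fun p => (p, [("nodes", PySem.Set.contains nodes p),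
                          ("segments", PySem.Set.contains segments p),
                          ("assembly", PySem.Set.contains assembly p)]))

-- ===== PRECONDITION & SPEC =====
def Spec_detect_managed_prefixes_py (layer_names : List String) (out : List (String × List (String × Bool))) : Prop := out = detect_managed_prefixes_py_alt layer_names
instance (layer_names : List String) (out : List (String × List (String × Bool))) : Decidable (Spec_detect_managed_prefixes_py layer_names out) := by unfold Spec_detect_managed_prefixes_py; infer_instance

-- ===== CLAIM (what is proved, stated in full; the proofs are below) =====
def Claim_equal_detect_managed_prefixes_py : Prop := ∀ (layer_names : List String), Dom_detect_managed_prefixes_py layer_names → Spec_detect_managed_prefixes_py layer_names (detect_managed_prefixes_py layer_names)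

-- ===== LEMMAS AND PROOFS =====

-- shorthands for the three suffix tests and the two slices
def e6 (nm : String) : Bool := PySem.Str.endswith nm "_nodes"
def eS (nm : String) : Bool := PySem.Str.endswith nm "_segments"
def eA (nm : String) : Bool := PySem.Str.endswith nm "_assembly"
def p6 (nm : String) : String := PySem.Str.slice nm none (some (-6))
def p9 (nm : String) : String := PySem.Str.slice nm none (some (-9))

-- the prefix a name contributes (none if it matches no suffix)
def tag? (nm : String) : Option String :=
  if e6 nm then some (p6 nm) else if eS nm || eA nm then some (p9 nm) else none

def hasN (ns : List String) (p : String) : Bool := ((ns.filter e6).map p6).contains p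
def hasS (ns : List String) (p : String) : Bool := ((ns.filter eS).map p9).contains p
def hasA (ns : List String) (p : String) : Bool := ((ns.filter eA).map p9).contains p

def metaOf (ns : List String) (p : String) : PySem.Dict String Bool :=
  PySem.Dict.mk [("nodes", hasN ns p), ("segments", hasS ns p), ("assembly", hasA ns p)]

def Astate (ns : List String) : PySem.Dict String (PySem.Dict String Bool) :=
  PySem.Dict.mk ((PySem.List.dedup (ns.filterMap tag?)).map (fun p => (p, metaOf ns p)))

-- mutual exclusivity of the three suffixes
lemma excl_6S (nm : String) (h : e6 nm = true) : eS nm = false := by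
  rw [e6] at h; rw [eS]
  simp only [PySem.Str.endswith_eq] at h ⊢
  rw [PySem.Chars.endswith_iff] at h
  by_contra hc
  rw [Bool.not_eq_false, PySem.Chars.endswith_iff] at hc
  have h2 := List.suffix_of_suffix_length_le h hc (by decide)
  revert h2; decide

lemma excl_6A (nm : String) (h : e6 nm = true) : eA nm = false := by
  rw [e6] at h; rw [eA]
  simp only [PySem.Str.endswith_eq] at h ⊢
  rw [PySem.Chars.endswith_iff] at h
  by_contra hc
  rw [Bool.not_eq_false, PySem.Chars.endswith_iff] at hc
  have h2 := List.suffix_of_suffix_length_le h hc (by decide)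
  revert h2; decide

lemma excl_SA (nm : String) (h : eS nm = true) : eA nm = false := by
  rw [eS] at h; rw [eA]
  simp only [PySem.Str.endswith_eq] at h ⊢
  rw [PySem.Chars.endswith_iff] at h
  by_contra hc
  rw [Bool.not_eq_false, PySem.Chars.endswith_iff] at hc
  have h2 := List.suffix_of_suffix_length_le h hc (by decide)
  revert h2; decide

lemma contains_ofList (L : List String) (p : String) :
    PySem.Set.contains (PySem.Set.ofList L) p = L.contains p := by
  simp [PySem.Set.contains, List.contains_eq_mem, PySem.Set.mem_ofList]

-- find? of self in an assoc list built by map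
lemma find_self {g : String → PySem.Dict String Bool} (D : List String) (p : String) (h : p ∈ D) :
    (D.map (fun q => (q, g q))).find? (fun pr => pr.1 == p) = some (p, g p) := by
  induction D with
  | nil => cases h
  | cons a D ih =>
    by_cases hap : a = p
    · subst hap
      rw [List.map_cons, List.find?_cons_of_pos (by simp)]
    · rw [List.map_cons, List.find?_cons_of_neg (by simp [hap])]
      simp only [List.mem_cons] at h
      exact ih (h.resolve_left (by intro hh; exact hap hh.symm))

lemma contains_map_fst (D : List String) (g : String → PySem.Dict String Bool) (p : String) :
    ((D.map (fun q => (q, g q))).any (fun pr => pr.1 == p)) = decide (p ∈ D) := by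
  by_cases h : p ∈ D
  · simp only [h, decide_true]
    rw [List.any_eq_true]
    exact ⟨(p, g p), List.mem_map_of_mem h, by simp⟩
  · simp only [h, decide_false]
    rw [List.any_eq_false]
    intro pr hpr
    simp only [List.mem_map] at hpr
    obtain ⟨q, hq, rfl⟩ := hpr
    simp only [beq_iff_eq]
    intro hqp; exact h (hqp ▸ hq)

-- generic evaluation of A's "setdefault then set flag" on a canonical assoc dict
lemma upd (D : List String) (g : String → PySem.Dict String Bool) (p key : String)
    (dflt : PySem.Dict String Bool) :
    ((PySem.Dict.mk (D.map (fun q => (q, g q)))).setdefault p dflt).modify p dflt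
        (fun m => m.insert key true) =
      if p ∈ D then PySem.Dict.mk (D.map (fun q => if q = p then (p, (g p).insert key true) else (q, g q)))
      else PySem.Dict.mk (D.map (fun q => (q, g q)) ++ [(p, dflt.insert key true)]) := by
  by_cases hp : p ∈ D
  · rw [if_pos hp]
    rw [PySem.Dict.setdefault, if_pos (by simpa [PySem.Dict.contains, contains_map_fst] using hp)]
    rw [PySem.Dict.modify, PySem.Dict.getD, PySem.Dict.get?]
    simp only []
    rw [find_self D p hp]
    simp only [Option.map_some, Option.getD_some]
    rw [PySem.Dict.insert, if_pos (by simpa [PySem.Dict.contains, contains_map_fst] using hp)]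
    simp only [List.map_map]
    congr 1
    apply List.map_congr_left
    intro q _
    by_cases hq : q = p <;> simp [hq]
  · rw [if_neg hp]
    rw [PySem.Dict.setdefault, if_neg (by simp [PySem.Dict.contains, hp])]
    rw [PySem.Dict.modify, PySem.Dict.getD, PySem.Dict.get?]
    simp only []
    rw [List.find?_append, List.find?_eq_none.mpr (by
      intro pr hpr
      simp only [List.mem_map] at hpr
      obtain ⟨q, hq, rfl⟩ := hpr
      simp only [beq_iff_eq]
      intro hqp; exact hp (hqp ▸ hq)), Option.none_or]
    rw [List.find?_cons_of_pos (by simp)]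
    simp only [Option.map_some, Option.getD_some]
    rw [PySem.Dict.insert, if_pos (by simp [PySem.Dict.contains])]
    simp only [List.map_append, List.map_map, List.map_cons, List.map_nil,
      beq_self_eq_true, if_pos]
    have hmap : List.map ((fun pr => if (pr.1 == p) = true then (p, dflt.insert key true) else pr) ∘ fun q => (q, g q)) D = List.map (fun q => (q, g q)) D := by
      apply List.map_congr_left
      intro q hq
      simp only [Function.comp_apply, beq_iff_eq]
      rw [if_neg (by intro hqp; exact hp (hqp ▸ hq))]
    rw [hmap]

lemma dedup_snoc (xs : List String) (x : String) :
    PySem.List.dedup (xs ++ [x]) =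
      if x ∈ xs then PySem.List.dedup xs else PySem.List.dedup xs ++ [x] := by
  simp only [PySem.List.dedup, PySem.Set.ofList, List.foldl_append, List.foldl_cons, List.foldl_nil]
  rw [PySem.Set.add]
  have h : PySem.Set.contains (List.foldl PySem.Set.add PySem.Set.empty xs) x = xs.contains x :=
    contains_ofList xs x
  rw [h]
  by_cases hx : x ∈ xs <;> simp [hx, List.contains_eq_mem]

lemma contains_singleton (x q : String) : ([x].contains q) = (x == q) := by
  simp only [List.contains_eq_mem, List.mem_singleton]
  rw [Bool.eq_iff_iff]
  simp only [decide_eq_true_eq, beq_iff_eq]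
  exact eq_comm

-- how each has-flag evolves when one name is appended
lemma hasN_snoc (ns : List String) (nm : String) (q : String) :
    hasN (ns ++ [nm]) q = (hasN ns q || (e6 nm && (p6 nm == q))) := by
  rw [hasN, hasN, List.filter_append, List.filter_singleton]
  by_cases h : e6 nm = true
  · rw [h, cond_true, Bool.true_and, List.map_append, List.contains_append,
      List.map_cons, List.map_nil, contains_singleton]
  · rw [Bool.eq_false_iff.mpr h, cond_false, Bool.false_and, Bool.or_false, List.append_nil]

lemma hasS_snoc (ns : List String) (nm : String) (q : String) :
    hasS (ns ++ [nm]) q = (hasS ns q || (eS nm && (p9 nm == q))) := by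
  rw [hasS, hasS, List.filter_append, List.filter_singleton]
  by_cases h : eS nm = true
  · rw [h, cond_true, Bool.true_and, List.map_append, List.contains_append,
      List.map_cons, List.map_nil, contains_singleton]
  · rw [Bool.eq_false_iff.mpr h, cond_false, Bool.false_and, Bool.or_false, List.append_nil]

lemma hasA_snoc (ns : List String) (nm : String) (q : String) :
    hasA (ns ++ [nm]) q = (hasA ns q || (eA nm && (p9 nm == q))) := by
  rw [hasA, hasA, List.filter_append, List.filter_singleton]
  by_cases h : eA nm = true
  · rw [h, cond_true, Bool.true_and, List.map_append, List.contains_append,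
      List.map_cons, List.map_nil, contains_singleton]
  · rw [Bool.eq_false_iff.mpr h, cond_false, Bool.false_and, Bool.or_false, List.append_nil]

lemma has_of_mem_filterMap (ns : List String) (p : String) (h : p ∈ ns.filterMap tag?) :
    (hasN ns p || (hasS ns p || hasA ns p)) = true := by
  simp only [List.mem_filterMap] at h
  obtain ⟨nm, hnm, htag⟩ := h
  rw [tag?] at htag
  by_cases h6 : e6 nm = true
  · rw [if_pos h6] at htag
    have : hasN ns p = true := by
      simp only [hasN, List.contains_eq_mem, decide_eq_true_eq, List.mem_map]
      exact ⟨nm, List.mem_filter.mpr ⟨hnm, h6⟩, by injection htag⟩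
    simp [this]
  · rw [if_neg h6] at htag
    by_cases hsa : (eS nm || eA nm) = true
    · rw [if_pos hsa] at htag
      rcases Bool.or_eq_true_iff.mp hsa with hs | ha
      · have : hasS ns p = true := by
          simp only [hasS, List.contains_eq_mem, decide_eq_true_eq, List.mem_map]
          exact ⟨nm, List.mem_filter.mpr ⟨hnm, hs⟩, by injection htag⟩
        simp [this]
      · have : hasA ns p = true := by
          simp only [hasA, List.contains_eq_mem, decide_eq_true_eq, List.mem_map]
          exact ⟨nm, List.mem_filter.mpr ⟨hnm, ha⟩, by injection htag⟩
        simp [this]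
    · rw [if_neg hsa] at htag; cases htag

lemma mem_filterMap_of_hasN (ns : List String) (p : String) (h : hasN ns p = true) :
    p ∈ ns.filterMap tag? := by
  simp only [hasN, List.contains_eq_mem, decide_eq_true_eq, List.mem_map] at h
  obtain ⟨nm, hnm, rfl⟩ := h
  obtain ⟨hmem, h6⟩ := List.mem_filter.mp hnm
  exact List.mem_filterMap.mpr ⟨nm, hmem, by rw [tag?, if_pos h6]⟩

lemma mem_filterMap_of_hasS (ns : List String) (p : String) (h : hasS ns p = true) :
    p ∈ ns.filterMap tag? := by
  simp only [hasS, List.contains_eq_mem, decide_eq_true_eq, List.mem_map] at h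
  obtain ⟨nm, hnm, rfl⟩ := h
  obtain ⟨hmem, hs⟩ := List.mem_filter.mp hnm
  have h6 : e6 nm = false := by
    by_contra hc
    rw [Bool.not_eq_false] at hc
    rw [excl_6S nm hc] at hs; cases hs
  exact List.mem_filterMap.mpr ⟨nm, hmem, by rw [tag?, if_neg (by simp [h6]), if_pos (by simp [hs])]⟩

lemma mem_filterMap_of_hasA (ns : List String) (p : String) (h : hasA ns p = true) :
    p ∈ ns.filterMap tag? := by
  simp only [hasA, List.contains_eq_mem, decide_eq_true_eq, List.mem_map] at h
  obtain ⟨nm, hnm, rfl⟩ := h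
  obtain ⟨hmem, ha⟩ := List.mem_filter.mp hnm
  have h6 : e6 nm = false := by
    by_contra hc
    rw [Bool.not_eq_false] at hc
    rw [excl_6A nm hc] at ha; cases ha
  exact List.mem_filterMap.mpr ⟨nm, hmem, by rw [tag?, if_neg (by simp [h6]), if_pos (by simp [ha])]⟩

lemma mkMeta_eq : mkMeta = PySem.Dict.mk [("nodes", false), ("segments", false), ("assembly", false)] := by
  decide

lemma ins_nodes (a b c : Bool) :
    (PySem.Dict.mk [("nodes", a), ("segments", b), ("assembly", c)]).insert "nodes" true =
      PySem.Dict.mk [("nodes", true), ("segments", b), ("assembly", c)] := by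
  simp [PySem.Dict.insert, PySem.Dict.contains]

lemma ins_segs (a b c : Bool) :
    (PySem.Dict.mk [("nodes", a), ("segments", b), ("assembly", c)]).insert "segments" true =
      PySem.Dict.mk [("nodes", a), ("segments", true), ("assembly", c)] := by
  simp [PySem.Dict.insert, PySem.Dict.contains]

lemma ins_asm (a b c : Bool) :
    (PySem.Dict.mk [("nodes", a), ("segments", b), ("assembly", c)]).insert "assembly" true =
      PySem.Dict.mk [("nodes", a), ("segments", b), ("assembly", true)] := by
  simp [PySem.Dict.insert, PySem.Dict.contains]

lemma metaOf_snoc_N (ns : List String) (nm q : String) (h6 : e6 nm = true) :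
    metaOf (ns ++ [nm]) q =
      if q = p6 nm then (metaOf ns q).insert "nodes" true else metaOf ns q := by
  have hs := excl_6S nm h6
  have ha := excl_6A nm h6
  simp only [metaOf]
  rw [ins_nodes, hasN_snoc, hasS_snoc, hasA_snoc, h6, hs, ha]
  simp only [Bool.true_and, Bool.false_and, Bool.or_false]
  by_cases hq : q = p6 nm
  · rw [if_pos hq, hq, beq_self_eq_true, Bool.or_true]
  · rw [if_neg hq, beq_eq_false_iff_ne.mpr (fun hh => hq hh.symm), Bool.or_false]

lemma metaOf_snoc_S (ns : List String) (nm q : String) (hs : eS nm = true) :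
    metaOf (ns ++ [nm]) q =
      if q = p9 nm then (metaOf ns q).insert "segments" true else metaOf ns q := by
  have h6 : e6 nm = false := by
    by_contra hc; rw [Bool.not_eq_false] at hc; rw [excl_6S nm hc] at hs; cases hs
  have ha := excl_SA nm hs
  simp only [metaOf]
  rw [ins_segs, hasN_snoc, hasS_snoc, hasA_snoc, h6, hs, ha]
  simp only [Bool.true_and, Bool.false_and, Bool.or_false]
  by_cases hq : q = p9 nm
  · rw [if_pos hq, hq, beq_self_eq_true, Bool.or_true]
  · rw [if_neg hq, beq_eq_false_iff_ne.mpr (fun hh => hq hh.symm), Bool.or_false]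

lemma metaOf_snoc_A (ns : List String) (nm q : String) (ha : eA nm = true) :
    metaOf (ns ++ [nm]) q =
      if q = p9 nm then (metaOf ns q).insert "assembly" true else metaOf ns q := by
  have h6 : e6 nm = false := by
    by_contra hc; rw [Bool.not_eq_false] at hc; rw [excl_6A nm hc] at ha; cases ha
  have hs : eS nm = false := by
    by_contra hc; rw [Bool.not_eq_false] at hc; rw [excl_SA nm hc] at ha; cases ha
  simp only [metaOf]
  rw [ins_asm, hasN_snoc, hasS_snoc, hasA_snoc, h6, hs, ha]
  simp only [Bool.true_and, Bool.false_and, Bool.or_false]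
  by_cases hq : q = p9 nm
  · rw [if_pos hq, hq, beq_self_eq_true, Bool.or_true]
  · rw [if_neg hq, beq_eq_false_iff_ne.mpr (fun hh => hq hh.symm), Bool.or_false]

lemma metaOf_snoc_none (ns : List String) (nm q : String) (h6 : e6 nm = false)
    (hs : eS nm = false) (ha : eA nm = false) :
    metaOf (ns ++ [nm]) q = metaOf ns q := by
  simp only [metaOf]
  rw [hasN_snoc, hasS_snoc, hasA_snoc, h6, hs, ha]
  simp only [Bool.false_and, Bool.or_false]

-- the generic snoc step shared by the three suffix cases of A's loop
lemma Astate_snoc_step (ns : List String) (nm : String) (p key : String)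
    (htag : tag? nm = some p)
    (hmeta : ∀ q, metaOf (ns ++ [nm]) q =
        if q = p then (metaOf ns q).insert key true else metaOf ns q)
    (hfresh : p ∉ ns.filterMap tag? → metaOf (ns ++ [nm]) p = mkMeta.insert key true) :
    ((Astate ns).setdefault p mkMeta).modify p mkMeta (fun m => m.insert key true) =
      Astate (ns ++ [nm]) := by
  rw [Astate, Astate, upd, List.filterMap_append]
  have hfm : List.filterMap tag? [nm] = [p] := by simp [htag]
  rw [hfm, dedup_snoc]
  by_cases hp : p ∈ ns.filterMap tag?
  · rw [if_pos hp, if_pos ((PySem.List.mem_dedup _ _).mpr hp)]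
    congr 1
    apply List.map_congr_left
    intro q _
    rw [hmeta q]
    by_cases hq : q = p
    · subst hq; simp
    · simp [hq]
  · rw [if_neg hp, if_neg (by rw [PySem.List.mem_dedup]; exact hp)]
    rw [List.map_append, List.map_cons, List.map_nil]
    congr 1
    congr 1
    · apply List.map_congr_left
      intro q hq
      have hqp : q ≠ p := by
        intro hh; subst hh; exact hp ((PySem.List.mem_dedup _ _).mp hq)
      rw [hmeta q, if_neg hqp]
    · rw [hfresh hp]


lemma A_state (ns : List String) : ns.foldl aStep PySem.Dict.empty = Astate ns := by
  induction ns using List.reverseRecOn with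
  | nil => rfl
  | append_singleton xs nm ih =>
    rw [List.foldl_append, List.foldl_cons, List.foldl_nil, ih]
    by_cases h6 : e6 nm = true
    · have h6' : PySem.Str.endswith nm "_nodes" = true := h6
      rw [aStep, if_pos h6']
      exact Astate_snoc_step xs nm (p6 nm) "nodes" (by rw [tag?, if_pos h6])
        (fun q => metaOf_snoc_N xs nm q h6)
        (fun hfr => by
          have hN : hasN xs (p6 nm) = false := by
            by_contra hc; rw [Bool.not_eq_false] at hc
            exact hfr (mem_filterMap_of_hasN xs _ hc)
          have hS : hasS xs (p6 nm) = false := by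
            by_contra hc; rw [Bool.not_eq_false] at hc
            exact hfr (mem_filterMap_of_hasS xs _ hc)
          have hA : hasA xs (p6 nm) = false := by
            by_contra hc; rw [Bool.not_eq_false] at hc
            exact hfr (mem_filterMap_of_hasA xs _ hc)
          rw [metaOf_snoc_N xs nm (p6 nm) h6, if_pos rfl, metaOf, hN, hS, hA,
            mkMeta_eq, ins_nodes])
    · have h6f : e6 nm = false := Bool.eq_false_iff.mpr h6
      rw [aStep, if_neg (by simpa using h6)]
      by_cases hsB : eS nm = true
      · have hs' : PySem.Str.endswith nm "_segments" = true := hsB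
        rw [if_pos hs']
        exact Astate_snoc_step xs nm (p9 nm) "segments"
          (by rw [tag?, if_neg (by simp [h6f]), if_pos (by simp [hsB])])
          (fun q => metaOf_snoc_S xs nm q hsB)
          (fun hfr => by
            have hN : hasN xs (p9 nm) = false := by
              by_contra hc; rw [Bool.not_eq_false] at hc
              exact hfr (mem_filterMap_of_hasN xs _ hc)
            have hS : hasS xs (p9 nm) = false := by
              by_contra hc; rw [Bool.not_eq_false] at hc
              exact hfr (mem_filterMap_of_hasS xs _ hc)
            have hA : hasA xs (p9 nm) = false := by
              by_contra hc; rw [Bool.not_eq_false] at hc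
              exact hfr (mem_filterMap_of_hasA xs _ hc)
            rw [metaOf_snoc_S xs nm (p9 nm) hsB, if_pos rfl, metaOf, hN, hS, hA,
              mkMeta_eq, ins_segs])
      · have hsf : eS nm = false := Bool.eq_false_iff.mpr hsB
        rw [if_neg (by simpa using hsB)]
        by_cases haB : eA nm = true
        · have ha' : PySem.Str.endswith nm "_assembly" = true := haB
          rw [if_pos ha']
          exact Astate_snoc_step xs nm (p9 nm) "assembly"
            (by rw [tag?, if_neg (by simp [h6f]), if_pos (by simp [haB])])
            (fun q => metaOf_snoc_A xs nm q haB)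
            (fun hfr => by
              have hN : hasN xs (p9 nm) = false := by
                by_contra hc; rw [Bool.not_eq_false] at hc
                exact hfr (mem_filterMap_of_hasN xs _ hc)
              have hS : hasS xs (p9 nm) = false := by
                by_contra hc; rw [Bool.not_eq_false] at hc
                exact hfr (mem_filterMap_of_hasS xs _ hc)
              have hA : hasA xs (p9 nm) = false := by
                by_contra hc; rw [Bool.not_eq_false] at hc
                exact hfr (mem_filterMap_of_hasA xs _ hc)
              rw [metaOf_snoc_A xs nm (p9 nm) haB, if_pos rfl, metaOf, hN, hS, hA,
                mkMeta_eq, ins_asm])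
        · have haf : eA nm = false := Bool.eq_false_iff.mpr haB
          rw [if_neg (by simpa using haB)]
          have htag : tag? nm = none := by
            rw [tag?, if_neg (by simp [h6f]), if_neg (by simp [hsf, haf])]
          rw [Astate, Astate, List.filterMap_append]
          have hfm : List.filterMap tag? [nm] = [] := by simp [htag]
          rw [hfm, List.append_nil]
          congr 1
          apply List.map_congr_left
          intro q _
          rw [metaOf_snoc_none xs nm q h6f hsf haf]

lemma b_fold (ns : List String) (s : List String) :
    ns.foldl bStep (s, s) =
      ((ns.filterMap tag?).foldl PySem.Set.add s, (ns.filterMap tag?).foldl PySem.Set.add s) := by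
  induction ns generalizing s with
  | nil => rfl
  | cons nm ns ih =>
    rw [List.foldl_cons]
    by_cases h6 : e6 nm = true
    · have h6' : PySem.Str.endswith nm "_nodes" = true := h6
      have hstep : bStep (s, s) nm = (PySem.Set.add s (p6 nm), PySem.Set.add s (p6 nm)) := by
        rw [bStep, if_pos h6']
        show (if PySem.Set.contains s (p6 nm) = true then (s, s)
          else (PySem.Set.add s (p6 nm), s ++ [p6 nm])) = _
        by_cases hc : PySem.Set.contains s (p6 nm) = true
        · rw [if_pos hc, PySem.Set.add, if_pos hc]
        · rw [if_neg hc, PySem.Set.add, if_neg hc]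
      rw [hstep, List.filterMap_cons_some (by rw [tag?, if_pos h6]), List.foldl_cons, ih]
    · have h6f : e6 nm = false := Bool.eq_false_iff.mpr h6
      by_cases hsa : (eS nm || eA nm) = true
      · have hsa' : (PySem.Str.endswith nm "_segments" || PySem.Str.endswith nm "_assembly") = true := hsa
        have hstep : bStep (s, s) nm = (PySem.Set.add s (p9 nm), PySem.Set.add s (p9 nm)) := by
          rw [bStep, if_neg (by simpa using h6), if_pos hsa']
          show (if PySem.Set.contains s (p9 nm) = true then (s, s)
            else (PySem.Set.add s (p9 nm), s ++ [p9 nm])) = _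
          by_cases hc : PySem.Set.contains s (p9 nm) = true
          · rw [if_pos hc, PySem.Set.add, if_pos hc]
          · rw [if_neg hc, PySem.Set.add, if_neg hc]
        rw [hstep, List.filterMap_cons_some
          (by rw [tag?, if_neg (by simp [h6f]), if_pos hsa]), List.foldl_cons, ih]
      · have hsaf : (PySem.Str.endswith nm "_segments" || PySem.Str.endswith nm "_assembly") = true → False := by
          intro hh; exact hsa hh
        have hstep : bStep (s, s) nm = (s, s) := by
          rw [bStep, if_neg (by simpa using h6), if_neg hsaf]
        rw [hstep, List.filterMap_cons_none (by
          rw [tag?, if_neg (by simp [h6f]), if_neg (by simpa using hsa)]), ih]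

-- ===== VERDICT (by name: the statement is the Claim_ definition above) =====
theorem detect_managed_prefixes_py_spec : Claim_equal_detect_managed_prefixes_py := by
  intro ns _
  rw [Spec_detect_managed_prefixes_py]
  simp only [detect_managed_prefixes_py, detect_managed_prefixes_py_alt]
  rw [A_state, Astate]
  have hfil : ((PySem.List.dedup (ns.filterMap tag?)).map (fun p => (p, metaOf ns p))).filter
      (fun pm => pm.2.values.any (fun b => b)) =
      (PySem.List.dedup (ns.filterMap tag?)).map (fun p => (p, metaOf ns p)) := by
    apply List.filter_eq_self.mpr
    intro pm hpm
    obtain ⟨q, hq, rfl⟩ := List.mem_map.mp hpm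
    have hmem : q ∈ ns.filterMap tag? := (PySem.List.mem_dedup _ _).mp hq
    have := has_of_mem_filterMap ns q hmem
    simp only [metaOf, PySem.Dict.values, List.map_cons, List.map_nil, List.any_cons,
      List.any_nil] at *
    simpa using this
  rw [hfil, List.map_map]
  have hstart : (PySem.Set.empty, ([] : List String)) = (([] : List String), ([] : List String)) := rfl
  rw [hstart, b_fold ns []]
  apply List.map_congr_left
  intro q _
  rw [Function.comp_apply]
  rw [contains_ofList, contains_ofList, contains_ofList]
  rfl
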